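-- pv_equiv track=rewrite | github.com/ndoornekamp/adventofcode | 2025/day10/part1.py | fewest_presses
-- ===== SOURCE A (Python) =====
-- import itertools
--
-- def fewest_presses(lights_desired: str, buttons: tuple[tuple[int, ...], ...]) -> int:
--     ans = 1_000_000
--
--     # Order doesn't matter; pressing a button twice does not need to be considered
--     for button in itertools.chain.from_iterable(itertools.combinations(buttons, r) for r in range(len(buttons) + 1)):
--         lights_after = "." * len(lights_desired)
--         for b in button:
--             lights_after = press_button(lights_after, b)
--
--         if lights_after == lights_desired:
--             ans = min(ans, len(button))
--
--     return ans
--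
-- def press_button(lights: str, button: tuple[int, ...]) -> str:
--     return "".join(char if i not in button else ("#" if char == "." else ".") for i, char in enumerate(lights))
-- ===== SOURCE B (Python) =====
-- def fewest_presses(lights_desired: str, buttons: tuple[tuple[int, ...], ...]) -> int:
--     # Dynamic programming over reachable GF(2) light patterns (bitmasks) with
--     # fewest presses, instead of enumerating all 2^n button subsets as strings.
--     L = len(lights_desired)
--     target = 0
--     for i, ch in enumerate(lights_desired):
--         if ch == '#':
--             target ^= 1 << i
--         elif ch != '.':
--             return 1_000_000
--     masks = []
--     for button in buttons:
--         m = 0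
--         for i in range(L):
--             if i in button:
--                 m ^= 1 << i
--         masks.append(m)
--     reach = {0: 0}
--     for m in masks:
--         new = dict(reach)
--         for v, c in reach.items():
--             w = v ^ m
--             cur = new.get(w)
--             if cur is None or c + 1 < cur:
--                 new[w] = c + 1
--         reach = new
--     return min(1_000_000, reach.get(target, 1_000_000))
-- ===== Notes on version B (the rewrite author's own statement) =====
-- stated objective: faster
-- what changed: A enumerates all 2^n button subsets via itertools.combinations and replays each as string toggling; B converts the target and each button to XOR bitmasks once and runs a fewest-presses dynamic programming over the dictionary of reachable light patterns, so work is bounded by the number of distinct reachable patterns instead of the number of subsets.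
import Mathlib
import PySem

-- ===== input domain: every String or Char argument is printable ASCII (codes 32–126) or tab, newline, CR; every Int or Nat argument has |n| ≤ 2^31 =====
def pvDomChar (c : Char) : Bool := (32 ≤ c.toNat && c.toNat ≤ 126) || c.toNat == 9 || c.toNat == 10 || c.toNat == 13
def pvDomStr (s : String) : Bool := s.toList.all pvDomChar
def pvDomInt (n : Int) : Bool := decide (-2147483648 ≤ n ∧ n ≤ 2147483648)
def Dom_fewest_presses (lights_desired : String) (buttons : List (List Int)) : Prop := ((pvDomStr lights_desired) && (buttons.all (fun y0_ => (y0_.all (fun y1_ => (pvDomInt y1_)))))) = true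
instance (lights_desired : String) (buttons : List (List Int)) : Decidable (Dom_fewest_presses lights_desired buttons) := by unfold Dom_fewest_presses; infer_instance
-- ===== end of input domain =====

-- B replaces A's enumeration of all 2^n button subsets (each replayed as string toggling)
-- by a fewest-presses dynamic programming over the set of reachable light patterns, kept
-- as XOR bitmasks in a dictionary; objective: faster.

-- ===== PORT A =====

-- press_button: toggle the characters of `lights` at the indices listed in `button`
def pvPress (lights : List Char) (button : List Int) : List Char :=
  (PySem.List.enumerate lights).map
    (fun p => if button.contains p.1 then (if p.2 = '.' then '#' else '.') else p.2)

-- itertools.combinations(xs, r) (as lists, in itertools' order)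
def pvCombos : List (List Int) → Nat → List (List (List Int))
  | _, 0 => [[]]
  | [], _ + 1 => []
  | x :: xs, r + 1 => (pvCombos xs r).map (fun c => x :: c) ++ pvCombos xs (r + 1)

def fewest_presses (lights_desired : String) (buttons : List (List Int)) : Int :=
  -- itertools.chain.from_iterable(itertools.combinations(buttons, r) for r in range(len(buttons)+1))
  ((List.range (buttons.length + 1)).flatMap (fun r => pvCombos buttons r)).foldl
    (fun ans button =>
      let lights_after :=
        button.foldl (fun s b => pvPress s b) (List.replicate lights_desired.toList.length '.')
      if lights_after = lights_desired.toList then min ans (button.length : Int) else ans)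
    1000000

-- ===== PORT B =====

-- Source B's parsing loop: target bitmask of lights_desired, none on a char other than '.'/'#'
def pvParse : List Char → Nat → Nat → Option Nat
  | [], _, t => some t
  | c :: cs, i, t =>
    if c = '#' then pvParse cs (i + 1) (t + (1 <<< i))
    else if c = '.' then pvParse cs (i + 1) t
    else none

-- Source B's mask loop: bitmask of the in-range positions a button toggles
def pvMaskOf (L : Nat) (button : List Int) : Nat :=
  (List.range L).foldl (fun (m i : Nat) => if button.contains (i : Int) then m ^^^ (1 <<< i) else m) 0

-- Source B's inner loop: relax every reachable pattern v by one press of mask m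
def pvDictStep (d : PySem.Dict Nat Nat) (m : Nat) : PySem.Dict Nat Nat :=
  d.items.foldl
    (fun nd p =>
      match nd.get? (p.1 ^^^ m) with
      | none => nd.insert (p.1 ^^^ m) (p.2 + 1)
      | some cur => if p.2 + 1 < cur then nd.insert (p.1 ^^^ m) (p.2 + 1) else nd)
    d

def fewest_presses_alt (lights_desired : String) (buttons : List (List Int)) : Int :=
  match pvParse lights_desired.toList 0 0 with
  | none => 1000000
  | some target =>
    let L := lights_desired.toList.length
    let masks := buttons.map (fun b => pvMaskOf L b)
    let reach := masks.foldl pvDictStep (PySem.Dict.ofList [(0, 0)])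
    min 1000000 ((reach.getD target 1000000 : Nat) : Int)

-- ===== PRECONDITION & SPEC =====
def Spec_fewest_presses (lights_desired : String) (buttons : List (List Int)) (out : Int) : Prop := out = fewest_presses_alt lights_desired buttons
instance (lights_desired : String) (buttons : List (List Int)) (out : Int) : Decidable (Spec_fewest_presses lights_desired buttons out) := by unfold Spec_fewest_presses; infer_instance

-- ===== CLAIM (what is proved, stated in full; the proofs are below) =====
def Claim_equal_fewest_presses : Prop := ∀ (lights_desired : String) (buttons : List (List Int)), Dom_fewest_presses lights_desired buttons → Spec_fewest_presses lights_desired buttons (fewest_presses lights_desired buttons)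

-- ===== LEMMAS AND PROOFS =====

-- ---- the common mathematical value: min-presses over subsets, as an Option Nat ----

def pvOmin : Option Nat → Option Nat → Option Nat
  | none, b => b
  | some x, none => some x
  | some x, some y => some (min x y)

def pvBest : List Nat → Nat → Option Nat
  | [], v => if v = 0 then some 0 else none
  | m :: ms, v => pvOmin (pvBest ms v) ((pvBest ms (v ^^^ m)).map (· + 1))

-- ---- Option-min toolbox ----

theorem pvOmin_none_right (a : Option Nat) : pvOmin a none = a := by cases a <;> rfl

theorem pvOmin_comm (a b : Option Nat) : pvOmin a b = pvOmin b a := by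
  cases a <;> cases b <;> simp [pvOmin, Nat.min_comm]

theorem pvOmin_assoc (a b c : Option Nat) : pvOmin (pvOmin a b) c = pvOmin a (pvOmin b c) := by
  cases a <;> cases b <;> cases c <;> simp [pvOmin, Nat.min_assoc]

theorem pvOmin_map_add (a b : Option Nat) :
    (pvOmin a b).map (· + 1) = pvOmin (a.map (· + 1)) (b.map (· + 1)) := by
  cases a <;> cases b <;> simp [pvOmin] <;> omega

-- ---- bitmask strings ----

def pvMstr (L m : Nat) : List Char := (List.range L).map (fun i => if m.testBit i then '#' else '.')

def pvEnc : List Char → Nat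
  | [] => 0
  | c :: cs => (if c = '#' then 1 else 0) + 2 * pvEnc cs

def pvValid (cs : List Char) : Prop := ∀ c ∈ cs, c = '.' ∨ c = '#'

theorem pvEnc_lt (cs : List Char) : pvEnc cs < 2 ^ cs.length := by
  induction cs with
  | nil => simp [pvEnc]
  | cons c cs ih =>
    simp only [pvEnc, List.length_cons, pow_succ]
    split <;> omega

theorem pvMstr_zero (L : Nat) : pvMstr L 0 = List.replicate L '.' := by
  simp [pvMstr, Nat.zero_testBit, List.map_const']

theorem pvMstr_succ (L m : Nat) :
    pvMstr (L + 1) m = (if m.testBit 0 then '#' else '.') :: pvMstr L (m / 2) := by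
  simp [pvMstr, List.range_succ_eq_map, List.map_map, Function.comp_def, Nat.succ_eq_add_one,
    Nat.testBit_add_one]

theorem pvMstr_enc (cs : List Char) (h : pvValid cs) : pvMstr cs.length (pvEnc cs) = cs := by
  induction cs with
  | nil => rfl
  | cons c cs ih =>
    have hc : c = '.' ∨ c = '#' := h c (by simp)
    have hcs : pvValid cs := fun x hx => h x (by simp [hx])
    have hbit : (pvEnc (c :: cs)).testBit 0 = decide (c = '#') := by
      rcases hc with rfl | rfl <;> simp [Nat.testBit_zero, pvEnc] <;> omega
    have hdiv : pvEnc (c :: cs) / 2 = pvEnc cs := by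
      simp only [pvEnc]; split <;> omega
    rw [List.length_cons, pvMstr_succ, hbit, hdiv, ih hcs]
    rcases hc with rfl | rfl <;> simp

theorem pvMstr_valid (L m : Nat) : pvValid (pvMstr L m) := by
  intro c hc
  simp only [pvMstr, List.mem_map] at hc
  obtain ⟨i, -, rfl⟩ := hc
  split <;> simp

theorem pvMstr_inj {L m t : Nat} (hm : m < 2 ^ L) (ht : t < 2 ^ L)
    (h : pvMstr L m = pvMstr L t) : m = t := by
  apply Nat.eq_of_testBit_eq
  intro i
  by_cases hi : i < L
  · have := congrArg (fun l => l[i]?) h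
    simp only [pvMstr, List.getElem?_map, List.getElem?_range hi] at this
    by_cases h1 : m.testBit i <;> by_cases h2 : t.testBit i <;> simp_all
  · rw [Nat.testBit_lt_two_pow (lt_of_lt_of_le hm (Nat.pow_le_pow_right (by norm_num) (by omega))),
      Nat.testBit_lt_two_pow (lt_of_lt_of_le ht (Nat.pow_le_pow_right (by norm_num) (by omega)))]

-- ---- the parse loop ----

theorem pvParse_valid (cs : List Char) :
    ∀ i t, pvValid cs → t < 2 ^ i → pvParse cs i t = some (t + pvEnc cs * 2 ^ i) := by
  induction cs with
  | nil => intro i t _ _; simp [pvParse, pvEnc]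
  | cons c cs ih =>
    intro i t h ht
    have hc : c = '.' ∨ c = '#' := h c (by simp)
    have hcs : pvValid cs := fun x hx => h x (by simp [hx])
    rcases hc with rfl | rfl
    · rw [show pvParse ('.' :: cs) i t = pvParse cs (i + 1) t from rfl,
        ih (i + 1) t hcs (by rw [pow_succ]; omega)]
      simp [pvEnc, pow_succ]; ring
    · rw [show pvParse ('#' :: cs) i t = pvParse cs (i + 1) (t + (1 <<< i)) from rfl,
        Nat.one_shiftLeft, ih (i + 1) _ hcs (by rw [pow_succ]; omega)]
      simp [pvEnc, pow_succ]; ring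

theorem pvParse_invalid (cs : List Char) :
    ∀ i t, ¬ pvValid cs → pvParse cs i t = none := by
  induction cs with
  | nil => intro i t h; exact absurd (by intro c hc; simp at hc) h
  | cons c cs ih =>
    intro i t h
    by_cases hc : c = '#'
    · subst hc
      have : ¬ pvValid cs := fun hv => h (by intro x hx; rcases List.mem_cons.1 hx with rfl | hx
                                             · right; rfl
                                             · exact hv x hx)
      rw [show pvParse ('#' :: cs) i t = pvParse cs (i + 1) (t + (1 <<< i)) from rfl, ih _ _ this]
    · by_cases hd : c = '.'
      · subst hd
        have : ¬ pvValid cs := fun hv => h (by intro x hx; rcases List.mem_cons.1 hx with rfl | hx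
                                               · left; rfl
                                               · exact hv x hx)
        rw [show pvParse ('.' :: cs) i t = pvParse cs (i + 1) t from rfl, ih _ _ this]
      · simp [pvParse, hc, hd]

theorem pvParse_some {cs : List Char} {t : Nat} (h : pvParse cs 0 0 = some t) :
    pvValid cs ∧ t = pvEnc cs := by
  by_cases hv : pvValid cs
  · refine ⟨hv, ?_⟩
    rw [pvParse_valid cs 0 0 hv (by norm_num)] at h
    simpa using h.symm
  · rw [pvParse_invalid cs 0 0 hv] at h; exact absurd h (by simp)

-- ---- the mask loop ----

theorem pvMaskOf_testBit (b : List Int) :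
    ∀ L j, (pvMaskOf L b).testBit j = (decide (j < L) && b.contains (j : Int)) := by
  intro L
  induction L with
  | zero => intro j; simp [pvMaskOf, Nat.zero_testBit]
  | succ L ih =>
    intro j
    have hstep : pvMaskOf (L + 1) b =
        if b.contains (L : Int) then pvMaskOf L b ^^^ (1 <<< L) else pvMaskOf L b := by
      simp only [pvMaskOf, List.range_succ, List.foldl_append, List.foldl_cons, List.foldl_nil]
    rw [hstep]
    by_cases hb : b.contains (L : Int) = true
    · rw [if_pos hb, Nat.testBit_xor, Nat.one_shiftLeft, Nat.testBit_two_pow, ih j]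
      rcases lt_trichotomy j L with h | rfl | h
      · simp [h, show j < L + 1 by omega, show ¬ (L = j) by omega]
      · simp [show ((j : Nat) : Int) ∈ b from by simpa using hb]
      · simp [show ¬ (j < L) by omega, show ¬ (j < L + 1) by omega, show ¬ (L = j) by omega]
    · rw [if_neg hb, ih j]
      rcases lt_trichotomy j L with h | rfl | h
      · simp [h, show j < L + 1 by omega]
      · simp [show ¬ ((j : Nat) : Int) ∈ b from by simpa using hb]
      · simp [show ¬ (j < L) by omega, show ¬ (j < L + 1) by omega]

theorem pvMaskOf_lt (L : Nat) (b : List Int) : pvMaskOf L b < 2 ^ L := by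
  induction L with
  | zero => simp [pvMaskOf]
  | succ L ih =>
    have hstep : pvMaskOf (L + 1) b =
        if b.contains (L : Int) then pvMaskOf L b ^^^ (1 <<< L) else pvMaskOf L b := by
      simp only [pvMaskOf, List.range_succ, List.foldl_append, List.foldl_cons, List.foldl_nil]
    rw [hstep]
    have h2 : (2 : Nat) ^ L < 2 ^ (L + 1) := by rw [pow_succ]; omega
    split
    · exact Nat.xor_lt_two_pow (lt_trans ih h2) (by rw [Nat.one_shiftLeft]; exact h2)
    · exact lt_trans ih h2

-- ---- pressing buttons is XOR on masks ----

theorem pvPress_mstr (L m : Nat) (b : List Int) :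
    pvPress (pvMstr L m) b = pvMstr L (m ^^^ pvMaskOf L b) := by
  apply List.ext_getElem
  · simp [pvPress, pvMstr, PySem.List.length_enumerate]
  · intro i h1 h2
    have hiL : i < L := by simpa [pvPress, pvMstr, PySem.List.length_enumerate] using h1
    have hmem : i < (PySem.List.enumerate (pvMstr L m) 0).length := by
      simpa [pvMstr, PySem.List.length_enumerate] using hiL
    simp only [pvPress, List.getElem_map, PySem.List.getElem_enumerate, pvMstr,
      List.getElem_range]
    rw [Nat.testBit_xor, pvMaskOf_testBit]
    simp only [Int.zero_add, decide_eq_true_eq, hiL, decide_true, Bool.true_and]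
    by_cases hc : b.contains (i : Int) <;> by_cases hm : m.testBit i <;> simp [hc, hm]

theorem pvFoldl_press (L : Nat) (bl : List (List Int)) :
    ∀ m, bl.foldl (fun s b => pvPress s b) (pvMstr L m)
      = pvMstr L (bl.foldl (fun a b => a ^^^ pvMaskOf L b) m) := by
  induction bl with
  | nil => intro m; rfl
  | cons x bl ih => intro m; simp only [List.foldl_cons, pvPress_mstr]; exact ih _

def pvXorAll (L : Nat) (bl : List (List Int)) : Nat :=
  bl.foldl (fun a b => a ^^^ pvMaskOf L b) 0

theorem pvXorAll_shift (L : Nat) (bl : List (List Int)) :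
    ∀ m, bl.foldl (fun a b => a ^^^ pvMaskOf L b) m = m ^^^ pvXorAll L bl := by
  induction bl with
  | nil => intro m; simp [pvXorAll]
  | cons x bl ih =>
    intro m
    simp only [List.foldl_cons, pvXorAll, Nat.zero_xor]
    rw [ih (m ^^^ pvMaskOf L x), ih (pvMaskOf L x), Nat.xor_assoc]

theorem pvXorAll_lt (L : Nat) (bl : List (List Int)) : pvXorAll L bl < 2 ^ L := by
  induction bl with
  | nil => simp [pvXorAll, Nat.two_pow_pos]
  | cons x bl ih =>
    have : pvXorAll L (x :: bl) = pvMaskOf L x ^^^ pvXorAll L bl := by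
      simp only [pvXorAll, List.foldl_cons, Nat.zero_xor]; exact pvXorAll_shift L bl _
    rw [this]
    exact Nat.xor_lt_two_pow (pvMaskOf_lt L x) ih

-- ---- the min-fold over candidate subsets ----

def pvNmin (g : List (List Int) → Int) (S : List (List (List Int))) : Int :=
  S.foldr (fun bl x => min (g bl) x) 1000000

theorem pvNmin_le (g : List (List Int) → Int) (S : List (List (List Int))) :
    pvNmin g S ≤ 1000000 := by
  induction S with
  | nil => simp [pvNmin]
  | cons a S ih => simp only [pvNmin, List.foldr_cons] at *; omega

theorem pvNmin_append (g : List (List Int) → Int) (A B : List (List (List Int))) :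
    pvNmin g (A ++ B) = min (pvNmin g A) (pvNmin g B) := by
  have key : ∀ A', A'.foldr (fun bl x => min (g bl) x) (pvNmin g B)
      = min (pvNmin g A') (pvNmin g B) := by
    intro A'
    induction A' with
    | nil =>
      have := pvNmin_le g B
      rw [List.foldr_nil, show pvNmin g [] = 1000000 from rfl]
      omega
    | cons a A' ih =>
      rw [List.foldr_cons, ih, show pvNmin g (a :: A') = min (g a) (pvNmin g A') from rfl]
      omega
  rw [pvNmin, List.foldr_append]
  exact key A

theorem pvNmin_congr {g g' : List (List Int) → Int} (S : List (List (List Int)))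
    (h : ∀ bl ∈ S, g bl = g' bl) : pvNmin g S = pvNmin g' S := by
  induction S with
  | nil => rfl
  | cons a S ih =>
    simp only [pvNmin, List.foldr_cons] at *
    rw [h a (by simp), ih (fun bl hb => h bl (by simp [hb]))]

theorem pvNmin_perm (g : List (List Int) → Int) {S S' : List (List (List Int))}
    (h : S.Perm S') : pvNmin g S = pvNmin g S' := by
  induction h with
  | nil => rfl
  | cons x _ ih =>
    rw [show ∀ l, pvNmin g (x :: l) = min (g x) (pvNmin g l) from fun _ => rfl,
      show ∀ l, pvNmin g (x :: l) = min (g x) (pvNmin g l) from fun _ => rfl, ih]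
  | swap x y l =>
    rw [show pvNmin g (y :: x :: l) = min (g y) (min (g x) (pvNmin g l)) from rfl,
      show pvNmin g (x :: y :: l) = min (g x) (min (g y) (pvNmin g l)) from rfl]
    omega
  | trans _ _ ih1 ih2 => rw [ih1, ih2]

theorem pvNmin_map (g : List (List Int) → Int) (h : List (List Int) → List (List Int))
    (S : List (List (List Int))) : pvNmin g (S.map h) = pvNmin (g ∘ h) S := by
  simp [pvNmin, List.foldr_map]

-- A's foldl is a min against pvNmin
theorem pvFoldl_eq_nmin (cond : List (List Int) → Prop) [DecidablePred cond] (cands : List (List (List Int))) :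
    ∀ a, a ≤ 1000000 →
      cands.foldl (fun ans bl => if cond bl then min ans (bl.length : Int) else ans) a
        = min a (pvNmin (fun bl => if cond bl then (bl.length : Int) else 1000000) cands) := by
  induction cands with
  | nil =>
    intro a ha
    rw [List.foldl_nil,
      show pvNmin (fun bl => if cond bl then (bl.length : Int) else 1000000) [] = 1000000 from rfl]
    omega
  | cons bl cands ih =>
    intro a ha
    simp only [List.foldl_cons]
    have hle := pvNmin_le (fun bl => if cond bl then (bl.length : Int) else 1000000) cands
    have hstep : (if cond bl then min a (bl.length : Int) else a) ≤ 1000000 := by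
      split <;> omega
    rw [ih _ hstep,
      show pvNmin (fun bl => if cond bl then (bl.length : Int) else 1000000) (bl :: cands)
        = min (if cond bl then (bl.length : Int) else 1000000)
            (pvNmin (fun bl => if cond bl then (bl.length : Int) else 1000000) cands) from rfl]
    by_cases h : cond bl
    · rw [if_pos h, if_pos h]; omega
    · rw [if_neg h, if_neg h]; omega

-- ---- the powerset and itertools' combination enumeration agree up to permutation ----

def pvSubs : List (List Int) → List (List (List Int))
  | [] => [[]]
  | x :: xs => (pvSubs xs).map (fun c => x :: c) ++ pvSubs xs

theorem pvCombos_big (xs : List (List Int)) : ∀ r, xs.length < r → pvCombos xs r = [] := by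
  induction xs with
  | nil => intro r h; match r, h with | r + 1, _ => rfl
  | cons x xs ih =>
    intro r h
    match r, h with
    | r + 1, h =>
      simp only [pvCombos, List.length_cons] at *
      rw [ih r (by omega), ih (r + 1) (by omega)]
      simp

theorem pvFlatMap_split {α : Type} (l : List Nat) (f g : Nat → List α) :
    (l.flatMap fun r => f r ++ g r).Perm (l.flatMap f ++ l.flatMap g) := by
  induction l with
  | nil => simp
  | cons a l ih =>
    simp only [List.flatMap_cons]
    calc ((f a ++ g a) ++ l.flatMap fun r => f r ++ g r).Perm
          ((f a ++ g a) ++ (l.flatMap f ++ l.flatMap g)) := ih.append_left _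
      _ = f a ++ (g a ++ l.flatMap f) ++ l.flatMap g := by simp [List.append_assoc]
      _ |>.Perm (f a ++ (l.flatMap f ++ g a) ++ l.flatMap g) :=
          (((List.perm_append_comm).append_left (f a)).append_right _)
      _ = (f a ++ l.flatMap f) ++ (g a ++ l.flatMap g) := by simp [List.append_assoc]

def pvCombosFlat (xs : List (List Int)) : List (List (List Int)) :=
  (List.range (xs.length + 1)).flatMap (fun r => pvCombos xs r)

theorem pvCombosFlat_perm (xs : List (List Int)) : (pvCombosFlat xs).Perm (pvSubs xs) := by
  induction xs with
  | nil => simp [pvCombosFlat, pvCombos, pvSubs]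
  | cons x xs ih =>
    have hsplit : pvCombosFlat (x :: xs)
        = ([] : List (List Int)) :: (List.range (xs.length + 1)).flatMap
            (fun r => (pvCombos xs r).map (fun c => x :: c) ++ pvCombos xs (r + 1)) := by
      simp only [pvCombosFlat, List.length_cons]
      rw [List.range_succ_eq_map, List.flatMap_cons, List.flatMap_map]
      simp [pvCombos, Nat.succ_eq_add_one, Function.comp_def]
    have hX : (([] : List (List Int)) :: (List.range (xs.length + 1)).flatMap
        (fun r => pvCombos xs (r + 1))) = pvCombosFlat xs := by
      have h1 : (List.range (xs.length + 2)).flatMap (fun r => pvCombos xs r)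
          = ([] : List (List Int)) :: (List.range (xs.length + 1)).flatMap
              (fun r => pvCombos xs (r + 1)) := by
        rw [List.range_succ_eq_map, List.flatMap_cons, List.flatMap_map]
        simp [pvCombos, Nat.succ_eq_add_one, Function.comp_def]
      have h2 : (List.range (xs.length + 2)).flatMap (fun r => pvCombos xs r)
          = pvCombosFlat xs := by
        rw [show xs.length + 2 = (xs.length + 1) + 1 from rfl, List.range_succ,
          List.flatMap_append]
        simp [pvCombosFlat, pvCombos_big xs (xs.length + 1) (by omega)]
      rw [← h1, h2]
    have hmap : (List.range (xs.length + 1)).flatMap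
        (fun r => (pvCombos xs r).map (fun c => x :: c))
        = (pvCombosFlat xs).map (fun c => x :: c) := by
      rw [pvCombosFlat, List.map_flatMap]
    have p1 : (pvCombosFlat (x :: xs)).Perm
        (([] : List (List Int)) :: ((List.range (xs.length + 1)).flatMap
            (fun r => (pvCombos xs r).map (fun c => x :: c)) ++
          (List.range (xs.length + 1)).flatMap (fun r => pvCombos xs (r + 1)))) := by
      rw [hsplit]
      exact (pvFlatMap_split _ _ _).cons _
    rw [hmap] at p1
    have pm := List.perm_middle (a := ([] : List (List Int)))
        (l₁ := (pvCombosFlat xs).map (fun c => x :: c))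
        (l₂ := (List.range (xs.length + 1)).flatMap (fun r => pvCombos xs (r + 1)))
    rw [hX] at pm
    exact p1.trans (pm.symm.trans ((ih.map (fun c => x :: c)).append ih))

-- ---- min over the powerset equals pvBest ----

def pvCapP (p : Int) : Option Nat → Int
  | none => 1000000
  | some k => min 1000000 ((k : Int) + p)

theorem pvNmin_subs (L : Nat) (bs : List (List Int)) :
    ∀ t p, pvNmin (fun bl => if pvXorAll L bl = t then (bl.length : Int) + p else 1000000)
        (pvSubs bs)
      = pvCapP p (pvBest (bs.map (fun b => pvMaskOf L b)) t) := by
  induction bs with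
  | nil =>
    intro t p
    by_cases h : t = 0 <;>
      simp [pvSubs, pvNmin, pvXorAll, pvBest, pvCapP, h] <;> omega
  | cons x bs ih =>
    intro t p
    simp only [pvSubs, pvNmin_append]
    have hcons : ∀ bl : List (List Int), pvXorAll L (x :: bl) = pvMaskOf L x ^^^ pvXorAll L bl := by
      intro bl
      simp only [pvXorAll, List.foldl_cons, Nat.zero_xor]
      exact pvXorAll_shift L bl _
    have hmap : pvNmin (fun bl => if pvXorAll L bl = t then (bl.length : Int) + p else 1000000)
        ((pvSubs bs).map (fun c => x :: c))
        = pvNmin (fun bl => if pvXorAll L bl = t ^^^ pvMaskOf L x then (bl.length : Int) + (p + 1)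
            else 1000000) (pvSubs bs) := by
      rw [pvNmin_map]
      apply pvNmin_congr
      intro bl _
      simp only [Function.comp]
      have hiff : (pvXorAll L (x :: bl) = t) ↔ (pvXorAll L bl = t ^^^ pvMaskOf L x) := by
        rw [hcons]
        constructor
        · intro h
          rw [← h, Nat.xor_comm (pvMaskOf L x) (pvXorAll L bl), Nat.xor_xor_cancel_right]
        · intro h
          rw [h, Nat.xor_comm t (pvMaskOf L x), Nat.xor_xor_cancel_left]
      by_cases h : pvXorAll L (x :: bl) = t
      · rw [if_pos h, if_pos (hiff.1 h)]
        push_cast [List.length_cons]; ring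
      · rw [if_neg h, if_neg (fun hh => h (hiff.2 hh))]
    rw [hmap, ih (t ^^^ pvMaskOf L x) (p + 1), ih t p]
    show min (pvCapP (p + 1) (pvBest (bs.map fun b => pvMaskOf L b) (t ^^^ pvMaskOf L x)))
        (pvCapP p (pvBest (bs.map fun b => pvMaskOf L b) t))
      = pvCapP p (pvBest ((x :: bs).map fun b => pvMaskOf L b) t)
    simp only [List.map_cons, pvBest]
    cases pvBest (bs.map fun b => pvMaskOf L b) t <;>
      cases pvBest (bs.map fun b => pvMaskOf L b) (t ^^^ pvMaskOf L x) <;>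
      simp [pvOmin, pvCapP] <;> push_cast <;> omega

-- ---- the dictionary DP computes pvBest ----

def pvS (m : Nat) (D : Nat → Option Nat) : Nat → Option Nat :=
  fun v => pvOmin (D v) ((D (v ^^^ m)).map (· + 1))

def pvFunFold : List Nat → (Nat → Option Nat) → (Nat → Option Nat)
  | [], D => D
  | m :: ms, D => pvFunFold ms (pvS m D)

theorem pvS_comm (m m' : Nat) (D : Nat → Option Nat) : pvS m (pvS m' D) = pvS m' (pvS m D) := by
  funext v
  simp only [pvS, pvOmin_map_add, Option.map_map]
  have hxx : v ^^^ m ^^^ m' = v ^^^ m' ^^^ m := by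
    rw [Nat.xor_assoc, Nat.xor_assoc, Nat.xor_comm m m']
  rw [hxx]
  simp only [← pvOmin_assoc]
  rw [pvOmin_assoc (D v), pvOmin_comm ((D (v ^^^ m')).map (· + 1)), ← pvOmin_assoc]

theorem pvFunFold_S (ms : List Nat) : ∀ (m : Nat) (D : Nat → Option Nat),
    pvFunFold ms (pvS m D) = pvS m (pvFunFold ms D) := by
  induction ms with
  | nil => intro m D; rfl
  | cons m' ms ih =>
    intro m D
    show pvFunFold ms (pvS m' (pvS m D)) = pvS m (pvFunFold ms (pvS m' D))
    rw [pvS_comm m' m, ih]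

def pvD0 : Nat → Option Nat := fun v => if v = 0 then some 0 else none

theorem pvBest_funFold (ms : List Nat) : ∀ v, pvBest ms v = pvFunFold ms pvD0 v := by
  induction ms with
  | nil => intro v; rfl
  | cons m ms ih =>
    intro v
    show pvOmin (pvBest ms v) ((pvBest ms (v ^^^ m)).map (· + 1)) = pvFunFold ms (pvS m pvD0) v
    rw [pvFunFold_S, ih v, ih (v ^^^ m)]
    rfl

def pvMerge (d : PySem.Dict Nat Nat) (m : Nat) (w : Nat) : Option Nat :=
  pvOmin (d.get? w) ((d.get? (w ^^^ m)).map (· + 1))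

theorem pvDictFold (d : PySem.Dict Nat Nat) (m : Nat) :
    ∀ (Q : List (Nat × Nat)) (nd : PySem.Dict Nat Nat),
      nd.keys.Nodup →
      (Q.map Prod.fst).Nodup →
      (∀ v c, (v, c) ∈ Q → d.get? v = some c) →
      (∀ w, nd.get? w = if (w ^^^ m) ∈ Q.map Prod.fst then d.get? w else pvMerge d m w) →
      (∀ w, (Q.foldl (fun nd p =>
          match nd.get? (p.1 ^^^ m) with
          | none => nd.insert (p.1 ^^^ m) (p.2 + 1)
          | some cur => if p.2 + 1 < cur then nd.insert (p.1 ^^^ m) (p.2 + 1) else nd) nd).get? w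
        = pvMerge d m w)
      ∧ (Q.foldl (fun nd p =>
          match nd.get? (p.1 ^^^ m) with
          | none => nd.insert (p.1 ^^^ m) (p.2 + 1)
          | some cur => if p.2 + 1 < cur then nd.insert (p.1 ^^^ m) (p.2 + 1) else nd) nd).keys.Nodup := by
  intro Q
  induction Q with
  | nil =>
    intro nd h1 _ _ h4
    refine ⟨fun w => ?_, h1⟩
    have := h4 w
    simpa using this
  | cons vc Q ih =>
    intro nd h1 h2 h3 h4
    obtain ⟨v, c⟩ := vc
    have hdv : d.get? v = some c := h3 v c (by simp)
    have hndu : nd.get? (v ^^^ m) = d.get? (v ^^^ m) := by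
      have := h4 (v ^^^ m)
      rw [if_pos (by simp [Nat.xor_xor_cancel_right])] at this
      exact this
    set u := v ^^^ m with hu
    have huv : u ^^^ m = v := by rw [hu, Nat.xor_xor_cancel_right]
    -- the one step
    set nd' := (match nd.get? u with
      | none => nd.insert u (c + 1)
      | some cur => if c + 1 < cur then nd.insert u (c + 1) else nd) with hnd'
    have hstep_get : ∀ w, nd'.get? w =
        if w = u then
          (match d.get? u with
           | none => some (c + 1)
           | some cur => some (min cur (c + 1)))
        else nd.get? w := by
      intro w
      rw [hnd', hndu]
      cases hgu : d.get? u with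
      | none =>
        dsimp only
        rw [PySem.Dict.get?_insert]
      | some cur =>
        dsimp only
        by_cases hlt : c + 1 < cur
        · rw [if_pos hlt, PySem.Dict.get?_insert]
          by_cases hw : w = u
          · rw [if_pos hw, if_pos hw]
            congr 1
            omega
          · rw [if_neg hw, if_neg hw]
        · rw [if_neg hlt]
          by_cases hw : w = u
          · rw [if_pos hw, hw, hndu, hgu]
            congr 1
            omega
          · rw [if_neg hw]
    have hmerge_u : nd'.get? u = pvMerge d m u := by
      rw [hstep_get u, if_pos rfl, pvMerge, huv, hdv]
      cases hgu : d.get? u <;> simp [pvOmin]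
    have h1' : nd'.keys.Nodup := by
      rw [hnd', hndu]
      cases d.get? u with
      | none => exact PySem.Dict.nodup_keys_insert _ _ _ h1
      | some cur =>
        dsimp only
        split
        · exact PySem.Dict.nodup_keys_insert _ _ _ h1
        · exact h1
    have h2' : (Q.map Prod.fst).Nodup := (List.nodup_cons.1 (by simpa using h2)).2
    have hvQ : v ∉ Q.map Prod.fst := (List.nodup_cons.1 (by simpa using h2)).1
    have h3' : ∀ v' c', (v', c') ∈ Q → d.get? v' = some c' := fun v' c' h => h3 v' c' (by simp [h])
    have h4' : ∀ w, nd'.get? w = if (w ^^^ m) ∈ Q.map Prod.fst then d.get? w else pvMerge d m w := by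
      intro w
      by_cases hw : w = u
      · subst hw
        rw [if_neg (by rw [huv]; exact hvQ)]
        exact hmerge_u
      · rw [hstep_get, if_neg hw]
        have hvw : v ≠ w ^^^ m := by
          intro h
          apply hw
          rw [hu, h, Nat.xor_xor_cancel_right]
        have := h4 w
        rw [this]
        simp only [List.map_cons, List.mem_cons]
        by_cases hmem : (w ^^^ m) ∈ Q.map Prod.fst
        · rw [if_pos hmem, if_pos (Or.inr hmem)]
        · rw [if_neg hmem, if_neg (by rintro (h | h); exact hvw h.symm; exact hmem h)]
    have := ih nd' h1' h2' h3' h4'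
    simpa using this

theorem pvDictStep_get (d : PySem.Dict Nat Nat) (m : Nat) (hnd : d.keys.Nodup) :
    (∀ w, (pvDictStep d m).get? w = pvMerge d m w) ∧ (pvDictStep d m).keys.Nodup := by
  have hkeys : d.items.map Prod.fst = d.keys := rfl
  apply pvDictFold d m d.items d hnd (by rw [hkeys]; exact hnd)
  · intro v c hvc
    exact PySem.Dict.get?_of_mem_items _ hvc hnd
  · intro w
    rw [hkeys]
    by_cases hmem : (w ^^^ m) ∈ d.keys
    · rw [if_pos hmem]
    · rw [if_neg hmem, pvMerge,
        (PySem.Dict.get?_eq_none_iff_not_mem_keys _ _).2 hmem, Option.map_none, pvOmin_none_right]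

theorem pvReach_get (masks : List Nat) :
    ∀ (d : PySem.Dict Nat Nat), d.keys.Nodup →
      ∀ v, (masks.foldl pvDictStep d).get? v = pvFunFold masks (fun w => d.get? w) v := by
  induction masks with
  | nil => intro d _ v; rfl
  | cons m ms ih =>
    intro d hnd v
    have hstep := pvDictStep_get d m hnd
    simp only [List.foldl_cons]
    rw [ih (pvDictStep d m) hstep.2 v]
    show pvFunFold ms (fun w => (pvDictStep d m).get? w) v = pvFunFold ms (pvS m fun w => d.get? w) v
    congr 1
    funext w
    rw [hstep.1 w]
    rfl

-- ---- assembling both sides ----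

theorem pvAlt_eq (ld : String) (buttons : List (List Int)) :
    fewest_presses_alt ld buttons =
      match pvParse ld.toList 0 0 with
      | none => 1000000
      | some t =>
        match pvBest (buttons.map (fun b => pvMaskOf ld.toList.length b)) t with
        | none => 1000000
        | some k => min 1000000 (k : Int) := by
  unfold fewest_presses_alt
  cases hp : pvParse ld.toList 0 0 with
  | none => rfl
  | some t =>
    simp only
    have hd0 : (PySem.Dict.ofList [((0 : Nat), (0 : Nat))]).keys.Nodup := by decide
    have hget : ∀ v, (PySem.Dict.ofList [((0 : Nat), (0 : Nat))]).get? v = pvD0 v := by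
      intro v
      by_cases h : v = 0
      · subst h; rfl
      · simp only [pvD0, if_neg h]
        show (PySem.Dict.mk [(0, 0)]).get? v = none
        rw [PySem.Dict.get?_mk_cons, if_neg (by simp; omega)]
        rfl
    rw [PySem.Dict.getD_eq_get?_getD,
      pvReach_get (buttons.map (fun b => pvMaskOf ld.toList.length b)) _ hd0 t]
    have : pvFunFold (buttons.map fun b => pvMaskOf ld.toList.length b)
        (fun w => (PySem.Dict.ofList [((0:Nat),(0:Nat))]).get? w) t
        = pvBest (buttons.map fun b => pvMaskOf ld.toList.length b) t := by
      rw [pvBest_funFold]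
      congr 1
      funext w
      exact hget w
    rw [this]
    cases pvBest (buttons.map fun b => pvMaskOf ld.toList.length b) t <;> simp

theorem pvMain (ld : String) (buttons : List (List Int)) :
    fewest_presses ld buttons = fewest_presses_alt ld buttons := by
  set cs := ld.toList with hcs
  set L := cs.length with hL
  have hfold : ∀ bl : List (List Int),
      bl.foldl (fun s b => pvPress s b) (List.replicate L '.') = pvMstr L (pvXorAll L bl) := by
    intro bl
    rw [← pvMstr_zero, pvFoldl_press]
    rfl
  rw [pvAlt_eq]
  cases hp : pvParse cs 0 0 with
  | none =>
    -- no subset can match: the desired string contains a char other than '.'/'#'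
    have hinvalid : ¬ pvValid cs := by
      intro hv
      rw [pvParse_valid cs 0 0 hv (by norm_num)] at hp
      exact absurd hp (by simp)
    unfold fewest_presses
    dsimp only
    rw [pvFoldl_eq_nmin _ _ 1000000 (by norm_num)]
    have hzero : pvNmin (fun bl =>
        if bl.foldl (fun s b => pvPress s b) (List.replicate ld.toList.length '.')
            = ld.toList then (bl.length : Int) else 1000000)
        (pvCombosFlat buttons) = 1000000 := by
      have h1 : ∀ bl ∈ pvCombosFlat buttons,
          (if bl.foldl (fun s b => pvPress s b) (List.replicate ld.toList.length '.')
            = ld.toList then (bl.length : Int) else 1000000) = 1000000 := by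
        intro bl _
        have : ¬ (bl.foldl (fun s b => pvPress s b) (List.replicate ld.toList.length '.')
            = ld.toList) := by
          rw [show ld.toList = cs from rfl, show ld.toList.length = L from rfl, hfold]
          intro h
          exact hinvalid (h ▸ pvMstr_valid L (pvXorAll L bl))
        rw [if_neg this]
      rw [pvNmin_congr (pvCombosFlat buttons) h1]
      clear h1
      induction pvCombosFlat buttons with
      | nil => rfl
      | cons a S ih => simp only [pvNmin, List.foldr_cons] at *; omega
    rw [show ((List.range (buttons.length + 1)).flatMap fun r => pvCombos buttons r)
        = pvCombosFlat buttons from rfl, hzero]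
    norm_num
  | some t =>
    obtain ⟨hvalid, ht⟩ := pvParse_some hp
    have hmstr_t : pvMstr L t = cs := by rw [ht, hL]; exact pvMstr_enc cs hvalid
    have ht_lt : t < 2 ^ L := by rw [ht, hL]; exact pvEnc_lt cs
    unfold fewest_presses
    dsimp only
    rw [pvFoldl_eq_nmin _ _ 1000000 (by norm_num)]
    have hcond : ∀ bl ∈ pvCombosFlat buttons,
        (if bl.foldl (fun s b => pvPress s b) (List.replicate ld.toList.length '.')
            = ld.toList then (bl.length : Int) else 1000000)
        = (if pvXorAll L bl = t then (bl.length : Int) + 0 else 1000000) := by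
      intro bl _
      have hiff : (bl.foldl (fun s b => pvPress s b) (List.replicate ld.toList.length '.')
          = ld.toList) ↔ pvXorAll L bl = t := by
        rw [show ld.toList = cs from rfl, show ld.toList.length = L from rfl, hfold]
        constructor
        · intro h
          exact pvMstr_inj (pvXorAll_lt L bl) ht_lt (by rw [h, hmstr_t])
        · intro h; rw [h, hmstr_t]
      by_cases h : pvXorAll L bl = t
      · rw [if_pos (hiff.2 h), if_pos h]
        omega
      · have : ¬ (bl.foldl (fun s b => pvPress s b) (List.replicate ld.toList.length '.')
            = ld.toList) := fun hh => h (hiff.1 hh)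
        rw [if_neg this, if_neg h]
    rw [show ((List.range (buttons.length + 1)).flatMap fun r => pvCombos buttons r)
        = pvCombosFlat buttons from rfl,
      pvNmin_congr (pvCombosFlat buttons) hcond,
      pvNmin_perm _ (pvCombosFlat_perm buttons),
      pvNmin_subs L buttons t 0]
    cases pvBest (buttons.map fun b => pvMaskOf L b) t with
    | none => rfl
    | some k => simp [pvCapP]

-- ===== VERDICT (by name: the statement is the Claim_ definition above) =====
theorem fewest_presses_spec : Claim_equal_fewest_presses := by
  intro ld buttons _
  unfold Spec_fewest_presses
  exact pvMain ld buttons
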